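-- pv_equiv track=rewrite | github.com/lgbouma/cdips | drivers/merge_for_exofoptess.py | resolve_rotn_metrics
-- ===== SOURCE A (Python) =====
-- def resolve_rotn_metrics(lgb, jh):
--     out = []
--     for _l, _j in zip(lgb, jh):
--         if 'missingrotation' in _l and 'missingrotation' in _j:
--             out.append('MissingRot')
--         elif 'missingrotation' in _l or 'missingrotation' in _j:
--             out.append('MissingRot?')
--         else:
--             out.append('')
--     return out
-- ===== SOURCE B (Python) =====
-- def resolve_rotn_metrics(lgb, jh):
--     n = min(len(lgb), len(jh))
--     hits_l = {i for i in range(n) if 'missingrotation' in lgb[i]}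
--     hits_j = {i for i in range(n) if 'missingrotation' in jh[i]}
--     return ['MissingRot' if (i in hits_l and i in hits_j)
--             else 'MissingRot?' if (i in hits_l or i in hits_j)
--             else ''
--             for i in range(n)]
-- ===== Notes on version B (the rewrite author's own statement) =====
-- stated objective: alternative
-- what changed: Replaces the single zip-and-branch pass with staged passes: build index sets of hits for each input list over range(n), then render the output by set-membership tests per index.
import Mathlib
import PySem

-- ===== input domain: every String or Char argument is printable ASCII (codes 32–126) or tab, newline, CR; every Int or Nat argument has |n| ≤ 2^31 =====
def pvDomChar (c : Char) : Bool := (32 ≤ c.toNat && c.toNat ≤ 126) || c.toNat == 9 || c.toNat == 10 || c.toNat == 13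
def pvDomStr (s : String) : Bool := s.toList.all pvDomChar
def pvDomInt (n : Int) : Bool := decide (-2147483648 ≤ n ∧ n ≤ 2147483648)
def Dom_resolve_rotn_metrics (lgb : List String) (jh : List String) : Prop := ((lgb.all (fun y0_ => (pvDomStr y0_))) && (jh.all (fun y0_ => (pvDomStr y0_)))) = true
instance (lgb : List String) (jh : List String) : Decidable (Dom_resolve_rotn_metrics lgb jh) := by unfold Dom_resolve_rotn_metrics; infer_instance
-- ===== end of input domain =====

-- B replaces A's one zip-and-branch pass by staged passes: build the index sets of hits
-- for each list, then render each position by set membership (objective: alternative).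

-- ===== PORT A =====
-- out = []; for _l, _j in zip(lgb, jh): append per the nested if/elif/else
def resolve_rotn_metrics (lgb : List String) (jh : List String) : List String :=
  (List.zip lgb jh).foldl (fun out p =>
    if PySem.Str.isIn "missingrotation" p.1 && PySem.Str.isIn "missingrotation" p.2 then
      out ++ ["MissingRot"]
    else if PySem.Str.isIn "missingrotation" p.1 || PySem.Str.isIn "missingrotation" p.2 then
      out ++ ["MissingRot?"]
    else
      out ++ [""]) []

-- ===== PORT B =====
-- lgb[i] / jh[i] for i drawn from range(n), n = min of the lengths, so in range: ported as pyGetD with default "" (exact here)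
def resolve_rotn_metrics_alt (lgb : List String) (jh : List String) : List String :=
  let n : Int := min (lgb.length : Int) (jh.length : Int)
  let hitsL : PySem.Set Int := PySem.Set.ofList ((PySem.List.pyRange 0 n 1).filter
      (fun i => PySem.Str.isIn "missingrotation" (PySem.List.pyGetD lgb i "")))
  let hitsJ : PySem.Set Int := PySem.Set.ofList ((PySem.List.pyRange 0 n 1).filter
      (fun i => PySem.Str.isIn "missingrotation" (PySem.List.pyGetD jh i "")))
  (PySem.List.pyRange 0 n 1).map (fun i =>
    if PySem.Set.contains hitsL i && PySem.Set.contains hitsJ i then "MissingRot"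
    else if PySem.Set.contains hitsL i || PySem.Set.contains hitsJ i then "MissingRot?"
    else "")

-- ===== PRECONDITION & SPEC =====
def Spec_resolve_rotn_metrics (lgb : List String) (jh : List String) (out : List String) : Prop := out = resolve_rotn_metrics_alt lgb jh
instance (lgb : List String) (jh : List String) (out : List String) : Decidable (Spec_resolve_rotn_metrics lgb jh out) := by unfold Spec_resolve_rotn_metrics; infer_instance

-- ===== CLAIM (what is proved, stated in full; the proofs are below) =====
def Claim_equal_resolve_rotn_metrics : Prop := ∀ (lgb : List String) (jh : List String), Dom_resolve_rotn_metrics lgb jh → Spec_resolve_rotn_metrics lgb jh (resolve_rotn_metrics lgb jh)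

-- ===== LEMMAS AND PROOFS =====
-- A's fold is the map of its per-pair branch over the zip
theorem pvA_eq_map (zs : List (String × String)) :
    zs.foldl (fun out p =>
      if PySem.Str.isIn "missingrotation" p.1 && PySem.Str.isIn "missingrotation" p.2 then
        out ++ ["MissingRot"]
      else if PySem.Str.isIn "missingrotation" p.1 || PySem.Str.isIn "missingrotation" p.2 then
        out ++ ["MissingRot?"]
      else
        out ++ [""]) []
    = zs.map (fun p =>
      if PySem.Str.isIn "missingrotation" p.1 && PySem.Str.isIn "missingrotation" p.2 then "MissingRot"
      else if PySem.Str.isIn "missingrotation" p.1 || PySem.Str.isIn "missingrotation" p.2 then "MissingRot?"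
      else "") := by
  suffices h : ∀ acc : List String, zs.foldl (fun out p =>
      if PySem.Str.isIn "missingrotation" p.1 && PySem.Str.isIn "missingrotation" p.2 then
        out ++ ["MissingRot"]
      else if PySem.Str.isIn "missingrotation" p.1 || PySem.Str.isIn "missingrotation" p.2 then
        out ++ ["MissingRot?"]
      else
        out ++ [""]) acc
      = acc ++ zs.map (fun p =>
        if PySem.Str.isIn "missingrotation" p.1 && PySem.Str.isIn "missingrotation" p.2 then "MissingRot"
        else if PySem.Str.isIn "missingrotation" p.1 || PySem.Str.isIn "missingrotation" p.2 then "MissingRot?"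
        else "") by
    simpa using h []
  induction zs with
  | nil => intro acc; simp
  | cons p zs ih =>
    intro acc
    simp only [List.foldl_cons, List.map_cons, ih]
    split_ifs <;> simp

-- membership in B's hit set, for i in range(n)
theorem pvContains_hits (xs : List String) (n i : Int) (hi : i ∈ PySem.List.pyRange 0 n 1) :
    PySem.Set.contains (PySem.Set.ofList ((PySem.List.pyRange 0 n 1).filter
        (fun i => PySem.Str.isIn "missingrotation" (PySem.List.pyGetD xs i "")))) i
      = PySem.Str.isIn "missingrotation" (PySem.List.pyGetD xs i "") := by
  rw [show PySem.Set.contains (PySem.Set.ofList ((PySem.List.pyRange 0 n 1).filter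
        (fun i => PySem.Str.isIn "missingrotation" (PySem.List.pyGetD xs i "")))) i
      = decide (i ∈ (PySem.List.pyRange 0 n 1).filter
        (fun i => PySem.Str.isIn "missingrotation" (PySem.List.pyGetD xs i ""))) from by
    simp [PySem.Set.mem_ofList]]
  simp [List.mem_filter, hi]

-- ===== VERDICT (by name: the statement is the Claim_ definition above) =====
theorem resolve_rotn_metrics_spec : Claim_equal_resolve_rotn_metrics := by
  intro lgb jh _
  unfold Spec_resolve_rotn_metrics resolve_rotn_metrics resolve_rotn_metrics_alt
  rw [pvA_eq_map]
  apply List.ext_getElem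
  · simp [PySem.List.length_pyRange_one, List.length_zip]
    omega
  · intro k h1 h2
    have hk : k < (min (lgb.length : Int) (jh.length : Int) - 0).toNat := by
      simpa [PySem.List.length_pyRange_one] using h2
    have hkl : k < lgb.length := by omega
    have hkj : k < jh.length := by omega
    have hmem : ((0 : Int) + (k : Int)) ∈ PySem.List.pyRange 0 (min (lgb.length : Int) (jh.length : Int)) 1 := by
      rw [PySem.List.mem_pyRange_one]; omega
    simp only [List.getElem_map, PySem.List.getElem_pyRange_one,
      pvContains_hits _ _ _ hmem, List.getElem_zip]
    have hl : PySem.List.pyGetD lgb ((0 : Int) + (k : Int)) "" = lgb[k] := by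
      rw [show ((0:Int) + (k:Int)) = ((k : Nat) : Int) by omega]
      simp [PySem.List.pyGetD_natCast, hkl]
    have hj : PySem.List.pyGetD jh ((0 : Int) + (k : Int)) "" = jh[k] := by
      rw [show ((0:Int) + (k:Int)) = ((k : Nat) : Int) by omega]
      simp [PySem.List.pyGetD_natCast, hkj]
    rw [hl, hj]
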